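-- pv_equiv track=rewrite | github.com/liuguangxi/defi_turing | Codes/dt235.py | solve_hitori
-- ===== SOURCE A (Python) =====
-- def is_connected(grid_size, shaded_mask):
--     """
--     Check if all unshaded (white) cells are connected in the grid.
--     """
--     white_cells = [(r, c) for r in range(grid_size) for c in range(grid_size)
--                    if not (shaded_mask & (1 << (r * grid_size + c)))]
--     if not white_cells:
--         return False
--
--     start = white_cells[0]
--     visited = {start}
--     stack = [start]
--     while stack:
--         r, c = stack.pop()
--         for dr, dc in [(0, 1), (0, -1), (1, 0), (-1, 0)]:
--             nr, nc = r + dr, c + dc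
--             if 0 <= nr < grid_size and 0 <= nc < grid_size:
--                 if (nr, nc) not in visited and not (shaded_mask & (1 << (nr * grid_size + nc))):
--                     visited.add((nr, nc))
--                     stack.append((nr, nc))
--     return len(visited) == len(white_cells)
--
-- def solve_hitori(grid):
--     """
--     Solves the Hitori puzzle given a grid of letters.
--     Returns the 0-indexed positions of the shaded squares.
--     """
--     size = len(grid)
--     states = [0] * (size * size)  # 0: unknown, 1: shaded (black), 2: unshaded (white)
--
--     def check_valid(idx, val):
--         r, c = divmod(idx, size)
--         if val == 1:  # Attempting to shade
--             # Rule: No two squares adjacent on one side can both be blackened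
--             for dr, dc in [(0, 1), (0, -1), (1, 0), (-1, 0)]:
--                 nr, nc = r + dr, c + dc
--                 if 0 <= nr < size and 0 <= nc < size:
--                     if states[nr * size + nc] == 1:
--                         return False
--         else:  # Attempting to leave white
--             # Rule: Each row and column must contain unique letters among white squares
--             for cc in range(size):
--                 if cc != c and states[r * size + cc] == 2 and grid[r][cc] == grid[r][c]:
--                     return False
--             for rr in range(size):
--                 if rr != r and states[rr * size + c] == 2 and grid[rr][c] == grid[r][c]:
--                     return False
--         return True
--
--     def backtrack(idx):
--         if idx == size * size:
--             # Check final connectivity constraint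
--             mask = sum(1 << i for i, v in enumerate(states) if v == 1)
--             return is_connected(size, mask)
--
--         r, c = divmod(idx, size)
--         # Optimization: Identify if a cell has duplicates in its row or column
--         has_dup = any(grid[r][cc] == grid[r][c] for cc in range(size) if cc != c) or \
--                   any(grid[rr][c] == grid[r][c] for rr in range(size) if rr != r)
--
--         # If no duplicates exist, the cell must be white. Otherwise, try both possibilities.
--         choices = [1, 2] if has_dup else [2]
--         for val in choices:
--             if check_valid(idx, val):
--                 states[idx] = val
--                 if backtrack(idx + 1):
--                     return True
--                 states[idx] = 0
--         return False
--
--     if backtrack(0):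
--         return [i for i, v in enumerate(states) if v == 1]
--     return []
-- ===== SOURCE B (Python) =====
-- def solve_hitori(grid):
--     """
--     Solves the Hitori puzzle given a grid of letters.
--     Returns the 0-indexed positions of the shaded squares.
--     Re-implementation: the per-cell duplicate flags are precomputed once into a
--     table before the search, and the leaf connectivity test uses round-based
--     relaxation to a fixpoint instead of a DFS stack.
--     """
--     size = len(grid)
--     n = size * size
--
--     # precomputed duplicate table: dup[i] == "cell i's letter repeats in its row or column"
--     dup = []
--     for i in range(n):
--         r, c = divmod(i, size)
--         row_vals = [grid[r][cc] for cc in range(size)]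
--         col_vals = [grid[rr][c] for rr in range(size)]
--         dup.append(row_vals.count(grid[r][c]) > 1 or col_vals.count(grid[r][c]) > 1)
--
--     states = [0] * n  # 0: unknown, 1: shaded, 2: white
--
--     def check_valid(idx, val):
--         r, c = divmod(idx, size)
--         if val == 1:
--             for dr, dc in [(0, 1), (0, -1), (1, 0), (-1, 0)]:
--                 nr, nc = r + dr, c + dc
--                 if 0 <= nr < size and 0 <= nc < size:
--                     if states[nr * size + nc] == 1:
--                         return False
--         else:
--             for cc in range(size):
--                 if cc != c and states[r * size + cc] == 2 and grid[r][cc] == grid[r][c]: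
--                     return False
--             for rr in range(size):
--                 if rr != r and states[rr * size + c] == 2 and grid[rr][c] == grid[r][c]:
--                     return False
--         return True
--
--     def connected(shaded_mask):
--         whites = [(r, c) for r in range(size) for c in range(size)
--                   if not (shaded_mask & (1 << (r * size + c)))]
--         if not whites:
--             return False
--         reach = {whites[0]}
--         for _ in range(n):
--             for cell in whites:
--                 if cell not in reach:
--                     r, c = cell
--                     if ((r, c + 1) in reach or (r, c - 1) in reach or
--                             (r + 1, c) in reach or (r - 1, c) in reach):
--                         reach.add(cell)
--         return len(reach) == len(whites)
--
--     def backtrack(idx):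
--         if idx == n:
--             mask = sum(1 << i for i, v in enumerate(states) if v == 1)
--             return connected(mask)
--         choices = [1, 2] if dup[idx] else [2]
--         for val in choices:
--             if check_valid(idx, val):
--                 states[idx] = val
--                 if backtrack(idx + 1):
--                     return True
--                 states[idx] = 0
--         return False
--
--     if backtrack(0):
--         return [i for i, v in enumerate(states) if v == 1]
--     return []
-- ===== Notes on version B (the rewrite author's own statement) =====
-- stated objective: alternative
-- what changed: The flood-fill connectivity check at search leaves is replaced by round-based relaxation to a fixpoint over the white cells, and the per-node duplicate rescan of has_dup is replaced by a duplicate table precomputed once before the backtracking.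
-- outside the precondition, e.g. on solve_hitori(['']): A returns [], B raises IndexError
import Mathlib
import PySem

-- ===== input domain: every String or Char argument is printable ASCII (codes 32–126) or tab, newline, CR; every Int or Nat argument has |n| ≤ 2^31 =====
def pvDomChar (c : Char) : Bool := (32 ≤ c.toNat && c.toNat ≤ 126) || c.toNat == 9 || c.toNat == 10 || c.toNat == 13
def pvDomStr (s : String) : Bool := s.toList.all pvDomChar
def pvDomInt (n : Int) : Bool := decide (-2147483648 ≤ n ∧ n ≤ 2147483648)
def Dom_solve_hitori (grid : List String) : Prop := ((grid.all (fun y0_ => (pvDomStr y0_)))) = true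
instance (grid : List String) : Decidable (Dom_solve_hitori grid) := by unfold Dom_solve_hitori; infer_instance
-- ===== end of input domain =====

-- B replaces A's per-node duplicate rescan by a precomputed table and A's DFS flood fill
-- by round-based relaxation to a fixpoint (objective: alternative; equal return values on Pre_).

-- ===== PORT A =====
-- shared pure accessors (used by both ports)
def pvGAt (grid : List String) (r c : Int) : Option Char :=
  match PySem.List.pyGet? grid r with
  | some s => PySem.Str.pyGet? s c
  | none => none

def pvDirs : List (Int × Int) := [(0, 1), (0, -1), (1, 0), (-1, 0)]

-- 0 <= r < size and 0 <= c < size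
def pvInR (size : Int) (p : Int × Int) : Bool :=
  decide (0 ≤ p.1 ∧ p.1 < size ∧ 0 ≤ p.2 ∧ p.2 < size)

-- `not (shaded_mask & (1 << (r*size+c)))`; the shift amount is nonnegative wherever evaluated,
-- so `.toNat` is exact there
def pvWhite (size mask r c : Int) : Bool :=
  PySem.Int.band mask ((1 : Int) <<< ((r * size + c).toNat)) == 0

-- the white_cells comprehension (identical in A and B)
def pvWhiteCells (size mask : Int) : List (Int × Int) :=
  (PySem.List.pyRange 0 size).flatMap (fun r =>
    ((PySem.List.pyRange 0 size).filter (fun c => pvWhite size mask r c)).map (fun c => (r, c)))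

-- mask = sum(1 << i for i, v in enumerate(states) if v == 1)   (zipIdx pairs are (value, index))
def pvMask (states : List Int) : Int :=
  (((states.zipIdx).filter (fun p => p.1 == 1)).map (fun p => ((1 : Int) <<< p.2))).sum

-- check_valid (identical helper in A and B)
def pvCheckValid (grid : List String) (size : Int) (states : List Int) (idx val : Int) : Bool :=
  let r := PySem.Int.floordiv idx size
  let c := PySem.Int.mod idx size
  if val == 1 then
    ! pvDirs.any (fun d =>
        pvInR size (r + d.1, c + d.2) &&
        (PySem.List.pyGetD states ((r + d.1) * size + (c + d.2)) 0 == 1))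
  else
    (! ((PySem.List.pyRange 0 size).filter (fun cc => cc != c)).any
        (fun cc => (PySem.List.pyGetD states (r * size + cc) 0 == 2) && (pvGAt grid r cc == pvGAt grid r c)))
    && (! ((PySem.List.pyRange 0 size).filter (fun rr => rr != r)).any
        (fun rr => (PySem.List.pyGetD states (rr * size + c) 0 == 2) && (pvGAt grid rr c == pvGAt grid r c)))

-- one neighbour direction of A's DFS inner loop
def pvStep (size mask r c : Int) (vs : PySem.Set (Int × Int) × List (Int × Int)) (d : Int × Int) :
    PySem.Set (Int × Int) × List (Int × Int) :=
  let q : Int × Int := (r + d.1, c + d.2)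
  if pvInR size q then
    if q ∉ vs.1 ∧ pvWhite size mask q.1 q.2 then (PySem.Set.add vs.1 q, q :: vs.2)
    else vs
  else vs

-- all cells of the grid (termination bound for the DFS)
def pvAllCells (size : Int) : List (Int × Int) :=
  (PySem.List.pyRange 0 size).flatMap (fun r => (PySem.List.pyRange 0 size).map (fun c => (r, c)))

-- A's DFS while-loop (stack top at the head).  The fuel argument only makes the loop total:
-- the entry point supplies enough fuel that the 0-guard is never reached (pvDfs_spec below).
def pvDfs (size mask : Int) : Nat → PySem.Set (Int × Int) → List (Int × Int) → PySem.Set (Int × Int)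
  | _, visited, [] => visited
  | 0, visited, _ :: _ => visited
  | Nat.succ fuel, visited, (r, c) :: rest =>
      pvDfs size mask fuel
        (List.foldl (pvStep size mask r c) (visited, rest) pvDirs).1
        (List.foldl (pvStep size mask r c) (visited, rest) pvDirs).2

-- is_connected
def pvIsConnected (gridSize shadedMask : Int) : Bool :=
  match pvWhiteCells gridSize shadedMask with
  | [] => false
  | start :: _ =>
      (pvDfs gridSize shadedMask ((pvAllCells gridSize).length + 1)
          (PySem.Set.ofList [start]) [start]).length
        == (pvWhiteCells gridSize shadedMask).length

-- backtrack (fuel counts the remaining recursion depth; the entry supplies enough)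
def pvBtA (grid : List String) (size : Int) : Nat → List Int → Int → Option (List Int)
  | 0, _, _ => none
  | Nat.succ fuel, states, idx =>
    if idx == size * size then
      (if pvIsConnected size (pvMask states) then some states else none)
    else
      let r := PySem.Int.floordiv idx size
      let c := PySem.Int.mod idx size
      let hasDup :=
        ((PySem.List.pyRange 0 size).filter (fun cc => cc != c)).any
          (fun cc => pvGAt grid r cc == pvGAt grid r c)
        || ((PySem.List.pyRange 0 size).filter (fun rr => rr != r)).any
          (fun rr => pvGAt grid rr c == pvGAt grid r c)
      let choices : List Int := if hasDup then [1, 2] else [2]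
      choices.foldl (fun acc v =>
        match acc with
        | some s => some s
        | none =>
          if pvCheckValid grid size states idx v then
            pvBtA grid size fuel (PySem.List.pySetD states idx v) (idx + 1)
          else none) none

def solve_hitori (grid : List String) : List Int :=
  let size : Int := PySem.List.len grid
  let states : List Int := List.replicate ((size * size).toNat) 0
  match pvBtA grid size ((size * size).toNat + 1) states 0 with
  | some s => ((s.zipIdx.filter (fun p => p.1 == 1)).map (fun p => ((p.2 : Int))))
  | none => []

-- ===== PORT B =====
-- does cell have an axis neighbour already reached?
def pvTouch (reach : PySem.Set (Int × Int)) (cell : Int × Int) : Bool :=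
  PySem.Set.contains reach (cell.1, cell.2 + 1) || PySem.Set.contains reach (cell.1, cell.2 - 1)
  || PySem.Set.contains reach (cell.1 + 1, cell.2) || PySem.Set.contains reach (cell.1 - 1, cell.2)

-- one relaxation of a single white cell
def pvPass (reach : PySem.Set (Int × Int)) (cell : Int × Int) : PySem.Set (Int × Int) :=
  if cell ∉ reach ∧ pvTouch reach cell then PySem.Set.add reach cell else reach

-- B's connectivity test: n*n relaxation rounds to a fixpoint
def pvConnAlt (size mask : Int) : Bool :=
  match pvWhiteCells size mask with
  | [] => false
  | start :: _ =>
      ((PySem.List.pyRange 0 (size * size)).foldl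
          (fun rs _ => (pvWhiteCells size mask).foldl pvPass rs)
          (PySem.Set.ofList [start])).length
        == (pvWhiteCells size mask).length

-- B's precomputed duplicate table
def pvDupTable (grid : List String) (size : Int) : List Bool :=
  (PySem.List.pyRange 0 (size * size)).map (fun i =>
    let r := PySem.Int.floordiv i size
    let c := PySem.Int.mod i size
    decide (1 < (((PySem.List.pyRange 0 size).map (fun cc => pvGAt grid r cc)).count (pvGAt grid r c)))
    || decide (1 < (((PySem.List.pyRange 0 size).map (fun rr => pvGAt grid rr c)).count (pvGAt grid r c))))

def pvBtB (grid : List String) (size : Int) (dup : List Bool) :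
    Nat → List Int → Int → Option (List Int)
  | 0, _, _ => none
  | Nat.succ fuel, states, idx =>
    if idx == size * size then
      (if pvConnAlt size (pvMask states) then some states else none)
    else
      let hasDup := PySem.List.pyGetD dup idx false
      let choices : List Int := if hasDup then [1, 2] else [2]
      choices.foldl (fun acc v =>
        match acc with
        | some s => some s
        | none =>
          if pvCheckValid grid size states idx v then
            pvBtB grid size dup fuel (PySem.List.pySetD states idx v) (idx + 1)
          else none) none

def solve_hitori_alt (grid : List String) : List Int :=
  let size : Int := PySem.List.len grid
  let dup := pvDupTable grid size
  let states : List Int := List.replicate ((size * size).toNat) 0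
  match pvBtB grid size dup ((size * size).toNat + 1) states 0 with
  | some s => ((s.zipIdx.filter (fun p => p.1 == 1)).map (fun p => ((p.2 : Int))))
  | none => []

-- ===== PRECONDITION & SPEC =====
-- Pre_ excludes grids having a row shorter than the side length: Python A raises IndexError on
-- (almost all of) them while scanning rows/columns; on the remaining corner (a 1x1 grid with an
-- empty row, see cites) A returns the empty list without ever indexing the grid, while B's precomputation
-- indexes every cell and raises.
def Pre_solve_hitori (grid : List String) : Prop :=
  ∀ s ∈ grid, (grid.length : Int) ≤ PySem.Str.len s

instance (grid : List String) : Decidable (Pre_solve_hitori grid) := by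
  unfold Pre_solve_hitori; infer_instance

def pvWitness_solve_hitori : List String := ["ab", "ba"]

def Spec_solve_hitori (grid : List String) (out : List Int) : Prop := out = solve_hitori_alt grid
instance (grid : List String) (out : List Int) : Decidable (Spec_solve_hitori grid out) := by
  unfold Spec_solve_hitori; infer_instance

-- ===== CLAIM (what is proved, stated in full; the proofs are below) =====
def Claim_equal_solve_hitori : Prop :=
  ∀ (grid : List String), Dom_solve_hitori grid → Pre_solve_hitori grid →
    Spec_solve_hitori grid (solve_hitori grid)

-- ===== LEMMAS AND PROOFS =====

lemma pvMem_allCells {size : Int} {p : Int × Int} :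
    p ∈ pvAllCells size ↔ pvInR size p = true := by
  unfold pvAllCells pvInR
  rw [List.mem_flatMap]
  simp only [List.mem_map, PySem.List.mem_pyRange_one, decide_eq_true_eq]
  constructor
  · rintro ⟨r, hr, c, hc, rfl⟩
    exact ⟨hr.1, hr.2, hc.1, hc.2⟩
  · rintro ⟨h1, h2, h3, h4⟩
    exact ⟨p.1, ⟨h1, h2⟩, p.2, ⟨h3, h4⟩, Prod.mk.eta⟩

-- what the four-direction fold of A's DFS does (also used by the termination proof)
lemma pvFold_spec (size mask r c : Int) :
    ∀ (ds : List (Int × Int)) (v : PySem.Set (Int × Int)) (st : List (Int × Int)),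
    ∃ ex : List (Int × Int),
      (List.foldl (pvStep size mask r c) (v, st) ds) = (v ++ ex, ex.reverse ++ st) ∧
      (∀ p ∈ ex, (∃ d ∈ ds, p = (r + d.1, c + d.2)) ∧ pvInR size p = true ∧
         pvWhite size mask p.1 p.2 = true ∧ p ∉ v) ∧
      (v.Nodup → (v ++ ex).Nodup) ∧
      (∀ d ∈ ds, pvInR size (r + d.1, c + d.2) = true → pvWhite size mask (r + d.1) (c + d.2) = true →
        (r + d.1, c + d.2) ∈ v ++ ex) := by
  intro ds
  induction ds with
  | nil => intro v st; exact ⟨[], by simp, by simp, by simp, by simp⟩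
  | cons d ds ih =>
    intro v st
    by_cases h1 : pvInR size (r + d.1, c + d.2) = true
    · by_cases h2 : (r + d.1, c + d.2) ∉ v ∧ pvWhite size mask (r + d.1) (c + d.2) = true
      · have hstep : pvStep size mask r c (v, st) d =
            (v ++ [(r + d.1, c + d.2)], (r + d.1, c + d.2) :: st) := by
          simp [pvStep, h1, h2.1, h2.2]
        obtain ⟨ex, hfold, hex, hnd, hcov⟩ := ih (v ++ [(r + d.1, c + d.2)]) ((r + d.1, c + d.2) :: st)
        refine ⟨(r + d.1, c + d.2) :: ex, ?_, ?_, ?_, ?_⟩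
        · rw [List.foldl_cons, hstep, hfold]
          simp
        · intro p hp
          rcases List.mem_cons.1 hp with rfl | hp
          · exact ⟨⟨d, List.mem_cons_self, rfl⟩, h1, h2.2, h2.1⟩
          · obtain ⟨⟨d', hd', rfl⟩, hin, hw, hnv⟩ := hex p hp
            exact ⟨⟨d', List.mem_cons_of_mem _ hd', rfl⟩, hin, hw, fun hmem => hnv (by simp [hmem])⟩
        · intro hv
          have hv1 : (v ++ [(r + d.1, c + d.2)]).Nodup := by
            simp only [List.nodup_append, List.nodup_cons, List.not_mem_nil, not_false_iff,
              List.nodup_nil, and_true, true_and]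
            refine ⟨hv, ?_⟩
            intro a ha b hb
            simp only [List.mem_singleton] at hb
            subst hb
            intro hcontra
            exact h2.1 (hcontra ▸ ha)
          have := hnd hv1
          simpa [List.append_assoc] using this
        · intro d' hd' hin hw
          rcases List.mem_cons.1 hd' with rfl | hd'
          · simp
          · have := hcov d' hd' hin hw
            simpa [List.append_assoc] using this
      · have hstep : pvStep size mask r c (v, st) d = (v, st) := by
          by_cases hm : (r + d.1, c + d.2) ∈ v
          · simp [pvStep, h1, hm]
          · have hw : ¬ pvWhite size mask (r + d.1) (c + d.2) = true := fun hw => h2 ⟨hm, hw⟩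
            simp [pvStep, h1, hm, hw]
        obtain ⟨ex, hfold, hex, hnd, hcov⟩ := ih v st
        refine ⟨ex, by rw [List.foldl_cons, hstep, hfold], ?_, hnd, ?_⟩
        · intro p hp
          obtain ⟨⟨d', hd', rfl⟩, hin, hw, hnv⟩ := hex p hp
          exact ⟨⟨d', List.mem_cons_of_mem _ hd', rfl⟩, hin, hw, hnv⟩
        · intro d' hd' hin hw
          rcases List.mem_cons.1 hd' with heq | hd'
          · subst heq
            have hm : (r + d'.1, c + d'.2) ∈ v := by
              by_contra hm; exact h2 ⟨hm, hw⟩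
            exact List.mem_append.2 (Or.inl hm)
          · exact hcov d' hd' hin hw
    · have hstep : pvStep size mask r c (v, st) d = (v, st) := by
        simp [pvStep, h1]
      obtain ⟨ex, hfold, hex, hnd, hcov⟩ := ih v st
      refine ⟨ex, by rw [List.foldl_cons, hstep, hfold], ?_, hnd, ?_⟩
      · intro p hp
        obtain ⟨⟨d', hd', rfl⟩, hin, hw, hnv⟩ := hex p hp
        exact ⟨⟨d', List.mem_cons_of_mem _ hd', rfl⟩, hin, hw, hnv⟩
      · intro d' hd' hin hw
        rcases List.mem_cons.1 hd' with heq | hd'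
        · subst heq
          exact absurd hin h1
        · exact hcov d' hd' hin hw

-- size bound on a duplicate-free list of cells (shows the DFS fuel is never exhausted)
lemma pvLen_bound {size : Int} (s0 : Int × Int) (v : List (Int × Int)) (hnd : v.Nodup)
    (hsub : ∀ p ∈ v, p = s0 ∨ pvInR size p = true) :
    v.length ≤ (s0 :: pvAllCells size).length :=
  (hnd.subperm (fun p hp => by
    rcases hsub p hp with rfl | h
    · exact List.mem_cons_self
    · exact List.mem_cons_of_mem _ (pvMem_allCells.2 h))).length_le


lemma pvMem_whiteCells {size mask : Int} {p : Int × Int} :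
    p ∈ pvWhiteCells size mask ↔ pvInR size p = true ∧ pvWhite size mask p.1 p.2 = true := by
  unfold pvWhiteCells
  rw [List.mem_flatMap]
  simp only [List.mem_map, List.mem_filter, PySem.List.mem_pyRange_one]
  constructor
  · rintro ⟨r, hr, c, ⟨hc, hw⟩, rfl⟩
    refine ⟨?_, hw⟩
    unfold pvInR
    simp only [decide_eq_true_eq]
    exact ⟨hr.1, hr.2, hc.1, hc.2⟩
  · rintro ⟨hin, hw⟩
    unfold pvInR at hin
    simp only [decide_eq_true_eq] at hin
    exact ⟨p.1, ⟨hin.1, hin.2.1⟩, p.2, ⟨⟨hin.2.2.1, hin.2.2.2⟩, hw⟩, Prod.mk.eta⟩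

lemma pvNodup_pyRange (n : Int) : (PySem.List.pyRange 0 n).Nodup := by
  rcases le_or_gt n 0 with h | h
  · have : PySem.List.pyRange 0 n = [] := by
      rw [List.eq_nil_iff_forall_not_mem]
      intro x hx
      have := PySem.List.mem_pyRange_one.1 hx
      omega
    simp [this]
  · have hn : n = ((n.toNat : Nat) : Int) := by omega
    rw [hn, PySem.List.pyRange_zero_natCast]
    exact List.nodup_range.map (fun a b h => by exact_mod_cast h)

lemma pvNodup_whiteCells (size mask : Int) : (pvWhiteCells size mask).Nodup := by
  rw [pvWhiteCells, List.nodup_flatMap]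
  constructor
  · intro r _
    exact ((pvNodup_pyRange size).filter _).map
      (fun a b h => by simpa using congrArg Prod.snd h)
  · have := pvNodup_pyRange size
    rw [List.Nodup] at this
    refine this.imp ?_
    intro a b hab
    simp only [Function.onFun, List.disjoint_left]
    rintro p hp hq
    simp only [List.mem_map, List.mem_filter] at hp hq
    obtain ⟨c1, _, rfl⟩ := hp
    obtain ⟨c2, _, h⟩ := hq
    exact hab (by simpa using congrArg Prod.fst h.symm)

-- adjacency between cells: b is a unit step from a, inside the grid and white
def pvAdj (size mask : Int) (a b : Int × Int) : Prop :=
  (∃ d ∈ pvDirs, b = (a.1 + d.1, a.2 + d.2)) ∧ pvInR size b = true ∧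
    pvWhite size mask b.1 b.2 = true

def pvReach (size mask : Int) (s p : Int × Int) : Prop :=
  Relation.ReflTransGen (pvAdj size mask) s p

lemma pvDfs_spec (size mask : Int) (s0 : Int × Int) :
    ∀ (fuel : Nat) (v : PySem.Set (Int × Int)) (st : List (Int × Int)),
      v.Nodup → (∀ p ∈ v, p = s0 ∨ pvInR size p = true) →
      st.length + (s0 :: pvAllCells size).length ≤ fuel + v.length →
      s0 ∈ v → (∀ p ∈ st, p ∈ v) →
      (∀ p ∈ v, pvReach size mask s0 p) →
      (∀ p ∈ v, p ∉ st → ∀ q, pvAdj size mask p q → q ∈ v) →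
      s0 ∈ pvDfs size mask fuel v st ∧ (pvDfs size mask fuel v st).Nodup ∧
      (∀ p ∈ pvDfs size mask fuel v st, pvReach size mask s0 p) ∧
      (∀ p ∈ pvDfs size mask fuel v st, ∀ q, pvAdj size mask p q → q ∈ pvDfs size mask fuel v st) := by
  intro fuel
  induction fuel with
  | zero =>
    intro v st hnd hrg hfl h0 _ hreach hcl
    have hb := pvLen_bound s0 v hnd hrg
    have hst : st = [] := List.eq_nil_of_length_eq_zero (by omega)
    subst hst
    rw [pvDfs]
    exact ⟨h0, hnd, hreach, fun p hp q hq => hcl p hp (by simp) q hq⟩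
  | succ fuel ihf =>
    intro v st hnd hrg hfl h0 hst hreach hcl
    match st with
    | [] =>
      rw [pvDfs]
      exact ⟨h0, hnd, hreach, fun p hp q hq => hcl p hp (by simp) q hq⟩
    | (r, c) :: rest =>
      obtain ⟨ex, hfold, hex, hnd2, hcov⟩ := pvFold_spec size mask r c pvDirs v rest
      rw [pvDfs, hfold]
      apply ihf
      · exact hnd2 hnd
      · intro p hp
        rcases List.mem_append.1 hp with h | h
        · exact hrg p h
        · exact Or.inr (hex p h).2.1
      · simp only [List.length_append, List.length_reverse, List.length_cons] at *
        omega
      · exact List.mem_append.2 (Or.inl h0)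
      · intro p hp
        rcases List.mem_append.1 hp with h | h
        · exact List.mem_append.2 (Or.inr (List.mem_reverse.1 h))
        · exact List.mem_append.2 (Or.inl (hst p (List.mem_cons_of_mem _ h)))
      · intro p hp
        rcases List.mem_append.1 hp with h | h
        · exact hreach p h
        · obtain ⟨⟨d, hd, rfl⟩, hin, hw, _⟩ := hex p h
          exact (hreach (r, c) (hst _ List.mem_cons_self)).tail ⟨⟨d, hd, rfl⟩, hin, hw⟩
      · intro p hp hpst q hq
        rcases List.mem_append.1 hp with h | h
        · by_cases hpc : p = (r, c)
          · subst hpc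
            obtain ⟨⟨d, hd, hqd⟩, hin, hw⟩ := hq
            subst hqd
            exact hcov d hd hin hw
          · have hprest : p ∉ rest := fun hr => hpst (List.mem_append.2 (Or.inr hr))
            have : p ∉ (r, c) :: rest := by
              intro hmem
              rcases List.mem_cons.1 hmem with h' | h'
              · exact hpc h'
              · exact hprest h'
            exact List.mem_append.2 (Or.inl (hcl p h this q hq))
        · exact absurd (List.mem_append.2 (Or.inl (List.mem_reverse.2 h))) hpst

lemma pvPass_eq (reach : PySem.Set (Int × Int)) (cell : Int × Int) :
    pvPass reach cell = reach ∨
      (cell ∉ reach ∧ pvTouch reach cell = true ∧ pvPass reach cell = reach ++ [cell]) := by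
  unfold pvPass
  split_ifs with h
  · exact Or.inr ⟨h.1, h.2, PySem.Set.add_of_not_mem h.1⟩
  · exact Or.inl rfl

lemma pvPassFold_prefix :
    ∀ (ws : List (Int × Int)) (reach : PySem.Set (Int × Int)),
      ∃ ex, ws.foldl pvPass reach = reach ++ ex ∧ ∀ p ∈ ex, p ∈ ws := by
  intro ws
  induction ws with
  | nil => intro reach; exact ⟨[], by simp, by simp⟩
  | cons w ws ih =>
    intro reach
    rcases pvPass_eq reach w with h | ⟨_, _, h⟩
    · obtain ⟨ex, hex, hsub⟩ := ih (pvPass reach w)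
      exact ⟨ex, by rw [List.foldl_cons, hex, h],
        fun p hp => List.mem_cons_of_mem _ (hsub p hp)⟩
    · obtain ⟨ex, hex, hsub⟩ := ih (pvPass reach w)
      refine ⟨w :: ex, by rw [List.foldl_cons, hex, h]; simp, ?_⟩
      intro p hp
      rcases List.mem_cons.1 hp with rfl | hp
      · exact List.mem_cons_self
      · exact List.mem_cons_of_mem _ (hsub p hp)

lemma pvPassFold_nodup :
    ∀ (ws : List (Int × Int)) (reach : PySem.Set (Int × Int)),
      reach.Nodup → (ws.foldl pvPass reach).Nodup := by
  intro ws
  induction ws with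
  | nil => intro reach h; simpa using h
  | cons w ws ih =>
    intro reach h
    refine ih _ ?_
    unfold pvPass
    split_ifs with hg
    · exact PySem.Set.nodup_add _ _ h
    · exact h

lemma pvPassFold_reach (size mask : Int) (s0 : Int × Int) :
    ∀ (ws : List (Int × Int)) (reach : PySem.Set (Int × Int)),
      (∀ p ∈ ws, p ∈ pvWhiteCells size mask) →
      (∀ p ∈ reach, pvReach size mask s0 p) →
      ∀ p ∈ ws.foldl pvPass reach, pvReach size mask s0 p := by
  intro ws
  induction ws with
  | nil => intro reach _ hr; simpa using hr
  | cons w ws ih =>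
    intro reach hws hr
    refine ih _ (fun p hp => hws p (List.mem_cons_of_mem _ hp)) ?_
    intro p hp
    rcases pvPass_eq reach w with h | ⟨_, htouch, h⟩
    · exact hr p (h ▸ hp)
    · rw [h] at hp
      rcases List.mem_append.1 hp with hp | hp
      · exact hr p hp
      · have hpw : p = w := by simpa using hp
        subst hpw
        have hwW := pvMem_whiteCells.1 (hws p List.mem_cons_self)
        unfold pvTouch at htouch
        simp only [Bool.or_eq_true, PySem.Set.contains_iff] at htouch
        rcases htouch with ((hq | hq) | hq) | hq
        · exact (hr _ hq).tail ⟨⟨(0, -1), by simp [pvDirs], by simp⟩, hwW.1, hwW.2⟩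
        · exact (hr _ hq).tail ⟨⟨(0, 1), by simp [pvDirs], by simp⟩, hwW.1, hwW.2⟩
        · exact (hr _ hq).tail ⟨⟨(-1, 0), by simp [pvDirs], by simp⟩, hwW.1, hwW.2⟩
        · exact (hr _ hq).tail ⟨⟨(1, 0), by simp [pvDirs], by simp⟩, hwW.1, hwW.2⟩

lemma pvPassFold_fix :
    ∀ (ws : List (Int × Int)) (reach : PySem.Set (Int × Int)),
      ws.foldl pvPass reach = reach →
      ∀ cell ∈ ws, cell ∉ reach → pvTouch reach cell = false := by
  intro ws
  induction ws with
  | nil => intro reach _ cell h; simp at h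
  | cons w ws ih =>
    intro reach hfix cell hcell hnotin
    have hpass : pvPass reach w = reach := by
      rcases pvPass_eq reach w with h | ⟨_, _, h⟩
      · exact h
      · exfalso
        obtain ⟨ex, hex, _⟩ := pvPassFold_prefix ws (pvPass reach w)
        rw [List.foldl_cons] at hfix
        rw [hfix, h] at hex
        have := congrArg List.length hex
        simp at this
    have hfix' : ws.foldl pvPass reach = reach := by
      rw [List.foldl_cons, hpass] at hfix
      exact hfix
    rcases List.mem_cons.1 hcell with rfl | hcell
    · by_contra htouch
      have ht : pvTouch reach cell = true := by
        cases h : pvTouch reach cell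
        · exact absurd h htouch
        · rfl
      have : pvPass reach cell = reach ++ [cell] := by
        unfold pvPass
        rw [if_pos ⟨hnotin, ht⟩]
        exact PySem.Set.add_of_not_mem hnotin
      rw [this] at hpass
      have := congrArg List.length hpass
      simp at this
    · exact ih reach hfix' cell hcell hnotin

lemma pvFoldl_const_iterate {α β : Type} (g : α → α) :
    ∀ (l : List β) (x : α), l.foldl (fun a _ => g a) x = g^[l.length] x := by
  intro l
  induction l with
  | nil => intro x; rfl
  | cons b l ih => intro x; rw [List.foldl_cons, ih, List.length_cons,
      Function.iterate_succ_apply]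

lemma pvIterate_prefix {α : Type} (g : List α → List α) (W : List α)
    (hpre : ∀ r, ∃ ex, g r = r ++ ex ∧ ∀ p ∈ ex, p ∈ W) :
    ∀ (m : Nat) (x : List α), ∃ ex, g^[m] x = x ++ ex ∧ ∀ p ∈ ex, p ∈ W := by
  intro m
  induction m with
  | zero => intro x; exact ⟨[], by simp, by simp⟩
  | succ m ih =>
    intro x
    obtain ⟨ex1, h1, hs1⟩ := hpre x
    obtain ⟨ex2, h2, hs2⟩ := ih (g x)
    refine ⟨ex1 ++ ex2, ?_, ?_⟩
    · rw [Function.iterate_succ_apply, h2, h1, List.append_assoc]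
    · intro p hp
      rcases List.mem_append.1 hp with hp | hp
      · exact hs1 p hp
      · exact hs2 p hp

lemma pvIterate_nodup {α : Type} (g : List α → List α)
    (hnd : ∀ r : List α, r.Nodup → (g r).Nodup) :
    ∀ (m : Nat) (x : List α), x.Nodup → (g^[m] x).Nodup := by
  intro m
  induction m with
  | zero => intro x h; simpa using h
  | succ m ih => intro x h; rw [Function.iterate_succ_apply]; exact ih _ (hnd _ h)

lemma pvIterate_fix {α : Type} (g : List α → List α) (W : List α)
    (hpre : ∀ r, ∃ ex, g r = r ++ ex ∧ ∀ p ∈ ex, p ∈ W)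
    (hnd : ∀ r : List α, r.Nodup → (g r).Nodup) :
    ∀ (m : Nat) (r : List α), r.Nodup → (∀ p ∈ r, p ∈ W) → W.length + 1 ≤ m + r.length →
      g (g^[m] r) = g^[m] r := by
  intro m
  induction m with
  | zero =>
    intro r hr hsub hle
    have := (hr.subperm hsub).length_le
    omega
  | succ m ih =>
    intro r hr hsub hle
    obtain ⟨ex, hg, hexW⟩ := hpre r
    rcases ex with _ | ⟨e, ex'⟩
    · simp only [List.append_nil] at hg
      rw [Function.iterate_fixed hg]
      exact hg
    · rw [Function.iterate_succ_apply]
      refine ih (g r) (hnd r hr) ?_ ?_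
      · intro p hp
        rw [hg] at hp
        rcases List.mem_append.1 hp with hp | hp
        · exact hsub p hp
        · exact hexW p hp
      · have : (g r).length = r.length + (ex'.length + 1) := by rw [hg]; simp
        omega

lemma pvEnc_inj {size r1 c1 r2 c2 : Int} (hc1 : 0 ≤ c1) (hc1' : c1 < size)
    (hc2 : 0 ≤ c2) (hc2' : c2 < size) (h : r1 * size + c1 = r2 * size + c2) :
    r1 = r2 ∧ c1 = c2 := by
  have hs : 0 < size := lt_of_le_of_lt hc1 hc1'
  rcases lt_trichotomy r1 r2 with hlt | heq | hgt
  · exfalso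
    have : (r1 + 1) * size ≤ r2 * size :=
      mul_le_mul_of_nonneg_right (by omega) (le_of_lt hs)
    nlinarith
  · subst heq
    constructor
    · rfl
    · omega
  · exfalso
    have : (r2 + 1) * size ≤ r1 * size :=
      mul_le_mul_of_nonneg_right (by omega) (le_of_lt hs)
    nlinarith

lemma pvWhites_le (size mask : Int) :
    (pvWhiteCells size mask).length ≤ (PySem.List.pyRange 0 (size * size)).length := by
  have hmap : ((pvWhiteCells size mask).map (fun p => p.1 * size + p.2)).Nodup := by
    refine List.Nodup.map_on ?_ (pvNodup_whiteCells size mask)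
    intro p hp q hq h
    have hp' := pvMem_whiteCells.1 hp
    have hq' := pvMem_whiteCells.1 hq
    unfold pvInR at hp' hq'
    simp only [decide_eq_true_eq] at hp' hq'
    obtain ⟨h1, h2⟩ := pvEnc_inj hp'.1.2.2.1 hp'.1.2.2.2 hq'.1.2.2.1 hq'.1.2.2.2 h
    exact Prod.ext h1 h2
  have hsub : ((pvWhiteCells size mask).map (fun p => p.1 * size + p.2)) ⊆
      PySem.List.pyRange 0 (size * size) := by
    intro x hx
    obtain ⟨p, hp, rfl⟩ := List.mem_map.1 hx
    have hp' := pvMem_whiteCells.1 hp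
    unfold pvInR at hp'
    simp only [decide_eq_true_eq] at hp'
    obtain ⟨⟨h1, h2, h3, h4⟩, _⟩ := hp'
    rw [PySem.List.mem_pyRange_one]
    constructor
    · have : 0 ≤ p.1 * size := mul_nonneg h1 (by omega)
      omega
    · have : (p.1 + 1) * size ≤ size * size := by
        have := mul_le_mul_of_nonneg_right (show p.1 + 1 ≤ size by omega)
          (show (0:Int) ≤ size by omega)
        linarith [this]
      nlinarith
  have := (hmap.subperm hsub).length_le
  simpa using this

lemma pvConn_eq (size mask : Int) : pvIsConnected size mask = pvConnAlt size mask := by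
  unfold pvIsConnected pvConnAlt
  cases hW : pvWhiteCells size mask with
  | nil => rfl
  | cons start tl =>
    have hstartW : start ∈ pvWhiteCells size mask := by rw [hW]; exact List.mem_cons_self
    have hstart' := pvMem_whiteCells.1 hstartW
    have hof : PySem.Set.ofList [start] = [start] :=
      PySem.Set.ofList_eq_self_of_nodup _ (by simp)
    -- DFS side
    obtain ⟨hA0, hAnd, hAsub, hAcl⟩ :=
      pvDfs_spec size mask start ((pvAllCells size).length + 1) (PySem.Set.ofList [start]) [start]
        (by rw [hof]; simp)
        (by rw [hof]; intro p hp; simp only [List.mem_singleton] at hp; exact Or.inl hp)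
        (by rw [hof]; simp; omega)
        (by rw [hof]; simp)
        (by rw [hof]; simp)
        (by rw [hof]; intro p hp; simp only [List.mem_singleton] at hp; subst hp
            exact Relation.ReflTransGen.refl)
        (by rw [hof]; intro p hp hnst; simp only [List.mem_singleton] at hp
            exact absurd (by simp [hp]) hnst)
    set V := pvDfs size mask ((pvAllCells size).length + 1) (PySem.Set.ofList [start]) [start]
      with hV
    have hAcomp : ∀ p, pvReach size mask start p → p ∈ V := by
      intro p h
      induction h with
      | refl => exact hA0
      | tail _ hadj ih => exact hAcl _ ih _ hadj
    -- relaxation side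
    set g := fun rs : PySem.Set (Int × Int) => (pvWhiteCells size mask).foldl pvPass rs with hg
    have hpre : ∀ r : List (Int × Int), ∃ ex, g r = r ++ ex ∧ ∀ p ∈ ex, p ∈ pvWhiteCells size mask :=
      fun r => pvPassFold_prefix _ r
    have hndg : ∀ r : List (Int × Int), r.Nodup → (g r).Nodup :=
      fun r h => pvPassFold_nodup _ r h
    set N := (PySem.List.pyRange 0 (size * size)).length with hN
    have hRdef : (PySem.List.pyRange 0 (size * size)).foldl
        (fun rs _ => (pvWhiteCells size mask).foldl pvPass rs) (PySem.Set.ofList [start])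
        = g^[N] [start] := by
      rw [hof, pvFoldl_const_iterate]
    set R := g^[N] [start] with hR
    have hR0 : start ∈ R := by
      obtain ⟨ex, hx, _⟩ := pvIterate_prefix g _ hpre N [start]
      rw [hR, hx]
      simp
    have hRnd : R.Nodup := pvIterate_nodup g hndg N [start] (by simp)
    have hRsub : ∀ p ∈ R, pvReach size mask start p := by
      have : ∀ (m : Nat), ∀ p ∈ g^[m] [start], pvReach size mask start p := by
        intro m
        induction m with
        | zero =>
          intro p hp
          simp only [Function.iterate_zero, id, List.mem_singleton] at hp
          subst hp
          exact Relation.ReflTransGen.refl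
        | succ m ih =>
          intro p hp
          rw [Function.iterate_succ_apply'] at hp
          exact pvPassFold_reach size mask start _ _ (fun q hq => hq) ih p hp
      exact this N
    have hfix : g R = R := by
      refine pvIterate_fix g (pvWhiteCells size mask) hpre hndg N [start] (by simp) ?_ ?_
      · intro p hp
        simp only [List.mem_singleton] at hp
        subst hp
        exact hstartW
      · have := pvWhites_le size mask
        rw [← hN] at this
        simp only [List.length_singleton]
        omega
    have hRcl : ∀ p ∈ R, ∀ q, pvAdj size mask p q → q ∈ R := by
      intro p hp q hq
      obtain ⟨⟨d, hd, hqd⟩, hin, hw⟩ := hq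
      have hqW : q ∈ pvWhiteCells size mask := pvMem_whiteCells.2 ⟨hin, hw⟩
      by_contra hqR
      have htouch := pvPassFold_fix _ R hfix q hqW hqR
      unfold pvTouch at htouch
      simp only [Bool.or_eq_false_iff] at htouch
      obtain ⟨⟨⟨ht1, ht2⟩, ht3⟩, ht4⟩ := htouch
      have hc1 : (q.1, q.2 + 1) ∉ R := fun hm => by
        have := (PySem.Set.contains_iff R _).2 hm; rw [ht1] at this; exact Bool.false_ne_true this
      have hc2 : (q.1, q.2 - 1) ∉ R := fun hm => by
        have := (PySem.Set.contains_iff R _).2 hm; rw [ht2] at this; exact Bool.false_ne_true this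
      have hc3 : (q.1 + 1, q.2) ∉ R := fun hm => by
        have := (PySem.Set.contains_iff R _).2 hm; rw [ht3] at this; exact Bool.false_ne_true this
      have hc4 : (q.1 - 1, q.2) ∉ R := fun hm => by
        have := (PySem.Set.contains_iff R _).2 hm; rw [ht4] at this; exact Bool.false_ne_true this
      simp only [pvDirs, List.mem_cons, List.not_mem_nil, or_false] at hd
      rcases hd with rfl | rfl | rfl | rfl
      · exact hc2 (by subst hqd; simpa using hp)
      · exact hc1 (by subst hqd; simpa using hp)
      · exact hc4 (by subst hqd; simpa using hp)
      · exact hc3 (by subst hqd; simpa using hp)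
    have hRcomp : ∀ p, pvReach size mask start p → p ∈ R := by
      intro p h
      induction h with
      | refl => exact hR0
      | tail _ hadj ih => exact hRcl _ ih _ hadj
    have hlen : V.length = R.length := by
      refine List.Perm.length_eq ?_
      rw [List.perm_ext_iff_of_nodup hAnd hRnd]
      intro a
      constructor
      · intro ha; exact hRcomp a (hAsub a ha)
      · intro ha; exact hAcomp a (hRsub a ha)
    simp only []
    rw [← hW, hRdef, ← hV, hlen]

lemma pvAny_count {α : Type} [BEq α] [LawfulBEq α] (f : Int → α) (L : List Int)
    (hnd : L.Nodup) (c : Int) (hc : c ∈ L) :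
    ((L.filter (fun x => x != c)).any (fun x => f x == f c))
      = decide (1 < ((L.map f).count (f c))) := by
  have hcount : (L.map f).count (f c) = L.countP (fun x => f x == f c) := by
    rw [List.count_eq_countP, List.countP_map]
    rfl
  have hone : L.filter (fun x => !(x != c)) = [c] := by
    simp only [bne, Bool.not_not]
    rw [List.filter_beq, List.count_eq_one_of_mem hnd hc]
    rfl
  have hsplit := List.countP_eq_countP_filter_add L (fun x => f x == f c) (fun x => x != c)
  rw [hone] at hsplit
  have hcc : List.countP (fun x => f x == f c) [c] = 1 := by simp
  cases hA : ((L.filter (fun x => x != c)).any (fun x => f x == f c))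
  · have h0 : List.countP (fun x => f x == f c) (L.filter (fun x => x != c)) = 0 := by
      rw [List.countP_eq_zero]
      intro a ha
      have := List.any_eq_false.1 hA a ha
      simpa using this
    rw [hcount] at *
    symm
    simp only [decide_eq_false_iff_not, not_lt]
    omega
  · obtain ⟨a, ha, hfa⟩ := List.any_eq_true.1 hA
    have hpos : 0 < List.countP (fun x => f x == f c) (L.filter (fun x => x != c)) := by
      rw [List.countP_pos_iff]
      exact ⟨a, ha, hfa⟩
    rw [hcount] at *
    symm
    simp only [decide_eq_true_eq]
    omega

lemma pvBt_eq (grid : List String) (size : Int) (hs : 0 ≤ size) :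
    ∀ (fuel : Nat) (states : List Int) (idx : Int), 0 ≤ idx → idx ≤ size * size →
      pvBtA grid size fuel states idx = pvBtB grid size (pvDupTable grid size) fuel states idx := by
  intro fuel
  induction fuel with
  | zero => intro states idx _ _; rfl
  | succ fuel ih =>
    intro states idx h0 h1
    rw [pvBtA, pvBtB]
    by_cases hidx : idx = size * size
    · simp only [hidx, beq_self_eq_true, if_true, pvConn_eq]
    · have hlt : idx < size * size := lt_of_le_of_ne h1 hidx
      have hpos : 0 < size := by
        rcases hs.eq_or_lt with h | h
        · exfalso; rw [← h] at hlt; simp at hlt; omega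
        · exact h
      have hbeq : (idx == size * size) = false := by
        simp [hidx]
      rw [hbeq]
      simp only [Bool.false_eq_true, if_false]
      have hc0 : 0 ≤ PySem.Int.mod idx size := PySem.Int.mod_nonneg idx hpos
      have hc1 : PySem.Int.mod idx size < size := PySem.Int.mod_lt idx hpos
      have hr0 : 0 ≤ PySem.Int.floordiv idx size :=
        (PySem.Int.le_floordiv_iff_mul_le hpos).2 (by omega)
      have hr1 : PySem.Int.floordiv idx size < size :=
        (PySem.Int.floordiv_lt_iff_lt_mul hpos).2 hlt
      have hdup : PySem.List.pyGetD (pvDupTable grid size) idx false =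
          (((PySem.List.pyRange 0 size).filter (fun cc => cc != PySem.Int.mod idx size)).any
            (fun cc => pvGAt grid (PySem.Int.floordiv idx size) cc ==
              pvGAt grid (PySem.Int.floordiv idx size) (PySem.Int.mod idx size))
          || ((PySem.List.pyRange 0 size).filter (fun rr => rr != PySem.Int.floordiv idx size)).any
            (fun rr => pvGAt grid rr (PySem.Int.mod idx size) ==
              pvGAt grid (PySem.Int.floordiv idx size) (PySem.Int.mod idx size))) := by
        unfold pvDupTable
        rw [PySem.List.pyGetD_map_pyRange_of_nonneg _ _ _ _ h0 hlt]
        dsimp only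
        rw [pvAny_count (fun cc => pvGAt grid (PySem.Int.floordiv idx size) cc)
            (PySem.List.pyRange 0 size) (pvNodup_pyRange size) (PySem.Int.mod idx size)
            (PySem.List.mem_pyRange_one.2 ⟨hc0, hc1⟩)]
        rw [pvAny_count (fun rr => pvGAt grid rr (PySem.Int.mod idx size))
            (PySem.List.pyRange 0 size) (pvNodup_pyRange size) (PySem.Int.floordiv idx size)
            (PySem.List.mem_pyRange_one.2 ⟨hr0, hr1⟩)]
      rw [hdup]
      refine PySem.List.foldl_congr_mem _ _ _ _ ?_
      intro acc x _
      cases acc with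
      | some s => rfl
      | none =>
        by_cases hcv : pvCheckValid grid size states idx x
        · rw [if_pos hcv, if_pos hcv]
          exact ih (PySem.List.pySetD states idx x) (idx + 1) (by omega) (by omega)
        · rw [if_neg hcv, if_neg hcv]

-- ===== VERDICT (by name: the statement is the Claim_ definition above) =====
theorem solve_hitori_spec : Claim_equal_solve_hitori := by
  intro grid _ _
  unfold Spec_solve_hitori
  unfold solve_hitori solve_hitori_alt
  dsimp only
  rw [pvBt_eq grid (PySem.List.len grid)
    (by rw [PySem.List.len_eq]; exact Int.natCast_nonneg _)
    _ _ 0 le_rfl (mul_self_nonneg _)]
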